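-- pv_equiv track=rewrite | github.com/leibenjamin/sec-narrative-drift | scripts/sec_check_term_hygiene.py | has_repeated_tokens
-- ===== SOURCE A (Python) =====
-- def has_repeated_tokens(term: str) -> bool:
--     tokens = term.lower().split()
--     seen: set[str] = set()
--     for token in tokens:
--         if not token:
--             continue
--         if token in seen:
--             return True
--         seen.add(token)
--     return False
-- ===== SOURCE B (Python) =====
-- def has_repeated_tokens(term: str) -> bool:
--     tokens = sorted(term.lower().split())
--     return any(a == b for a, b in zip(tokens, tokens[1:]))
-- ===== Notes on version B (the rewrite author's own statement) =====
-- stated objective: alternative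
-- what changed: Replaces the incremental seen-set scan with early exit by sort-then-adjacent-scan: sort the lowercased tokens and report a duplicate iff some adjacent pair is equal (correct because equal tokens are adjacent after sorting).
import Mathlib
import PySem

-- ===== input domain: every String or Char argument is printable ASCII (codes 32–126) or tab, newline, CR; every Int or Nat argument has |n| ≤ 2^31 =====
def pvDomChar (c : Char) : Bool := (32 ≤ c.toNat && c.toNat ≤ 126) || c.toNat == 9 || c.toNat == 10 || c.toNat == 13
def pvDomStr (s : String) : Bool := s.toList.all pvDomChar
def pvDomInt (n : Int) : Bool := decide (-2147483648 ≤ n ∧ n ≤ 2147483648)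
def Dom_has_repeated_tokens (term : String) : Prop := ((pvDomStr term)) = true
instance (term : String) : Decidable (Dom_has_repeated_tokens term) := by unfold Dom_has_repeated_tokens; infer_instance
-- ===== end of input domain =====

-- B replaces A's incremental seen-set scan by sort-then-adjacent-scan: sort the
-- lowercased tokens and report a duplicate iff some adjacent pair is equal (objective: alternative).

-- ===== PORT A =====
-- the 'for token in tokens' loop with early return, carrying the growing 'seen' set
def hrtLoop : List String → PySem.Set String → Bool
  | [], _ => false
  | token :: rest, seen =>
    if token = "" then hrtLoop rest seen
    else if PySem.Set.contains seen token then true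
    else hrtLoop rest (PySem.Set.add seen token)

def has_repeated_tokens (term : String) : Bool :=
  let tokens := PySem.Str.split₀ (PySem.Str.lower term)
  hrtLoop tokens PySem.Set.empty

-- ===== PORT B =====
-- tokens = sorted(term.lower().split()); any(a == b for a, b in zip(tokens, tokens[1:]))
def has_repeated_tokens_alt (term : String) : Bool :=
  let tokens := PySem.List.sorted (PySem.Str.split₀ (PySem.Str.lower term)) (fun x => x) false
  (List.zip tokens (PySem.List.slice tokens (some 1) none)).any (fun p => p.1 == p.2)

-- ===== PRECONDITION & SPEC =====
def Spec_has_repeated_tokens (term : String) (out : Bool) : Prop := out = has_repeated_tokens_alt term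
instance (term : String) (out : Bool) : Decidable (Spec_has_repeated_tokens term out) := by unfold Spec_has_repeated_tokens; infer_instance

-- ===== CLAIM (what is proved, stated in full; the proofs are below) =====
def Claim_equal_has_repeated_tokens : Prop := ∀ (term : String), Dom_has_repeated_tokens term → Spec_has_repeated_tokens term (has_repeated_tokens term)

-- ===== LEMMAS AND PROOFS =====

-- each word produced by split₀.go is nonempty (provided the accumulator holds nonempty words)
theorem hrt_split_go_ne_nil (s : List Char) :
    ∀ (cur : List Char) (acc : List (List Char)), (∀ w ∈ acc, w ≠ []) →
      ∀ w ∈ PySem.Chars.split₀.go s cur acc, w ≠ [] := by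
  induction s with
  | nil =>
    intro cur acc hacc w hw
    rw [PySem.Chars.split₀.go.eq_def] at hw
    by_cases hcur : cur.isEmpty = true
    · simp [hcur] at hw
      exact hacc w hw
    · simp [hcur] at hw
      rcases hw with hw | hw
      · exact hacc w hw
      · subst hw
        simpa [List.isEmpty_iff] using hcur
  | cons c rest ih =>
    intro cur acc hacc w hw
    rw [PySem.Chars.split₀.go.eq_def] at hw
    by_cases hsp : PySem.Chars.isspace c = true
    · by_cases hcur : cur.isEmpty = true
      · simp [hsp, hcur] at hw
        exact ih [] acc hacc w hw
      · simp [hsp, hcur] at hw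
        refine ih [] (cur.reverse :: acc) ?_ w hw
        intro v hv
        rcases List.mem_cons.mp hv with hv | hv
        · subst hv
          simpa [List.isEmpty_iff] using hcur
        · exact hacc v hv
    · simp [hsp] at hw
      exact ih (c :: cur) acc hacc w hw

-- a str.split() result never contains the empty string
theorem hrt_split₀_ne_empty (s : String) : ∀ t ∈ PySem.Str.split₀ s, t ≠ "" := by
  intro t ht
  simp [PySem.Str.split₀] at ht
  obtain ⟨w, hw, rfl⟩ := ht
  have hne : w ≠ [] := hrt_split_go_ne_nil s.toList [] [] (by simp) w hw
  intro h
  apply hne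
  have : (String.ofList w).toList = ("" : String).toList := by rw [h]
  simpa using this

-- A's loop returns true iff the token list has a duplicate or meets the seen set
theorem hrtLoop_eq (xs : List String) :
    ∀ (s : PySem.Set String), (∀ t ∈ xs, t ≠ "") →
      hrtLoop xs s = !decide (xs.Nodup ∧ ∀ t ∈ xs, t ∉ s) := by
  induction xs with
  | nil => intro s _; simp [hrtLoop]
  | cons x rest ih =>
    intro s hne
    have hx : x ≠ "" := hne x (by simp)
    have hrest : ∀ t ∈ rest, t ≠ "" := fun t ht => hne t (by simp [ht])
    simp only [hrtLoop, if_neg hx]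
    by_cases h : PySem.Set.contains s x = true
    · have hx' : x ∈ s := (PySem.Set.contains_iff s x).mp h
      rw [if_pos h]
      have hthis : ¬ ((x :: rest).Nodup ∧ ∀ t ∈ x :: rest, t ∉ s) := by
        rintro ⟨-, hall⟩
        exact hall x (by simp) hx'
      rw [decide_eq_false hthis]
      rfl
    · have hx' : x ∉ s := fun hc => h ((PySem.Set.contains_iff s x).mpr hc)
      rw [if_neg h, ih (PySem.Set.add s x) hrest]
      congr 1
      apply decide_eq_decide.mpr
      constructor
      · rintro ⟨hnd, hall⟩
        refine ⟨List.nodup_cons.mpr ⟨fun hc => hall x hc ((PySem.Set.mem_add s x x).mpr (Or.inr rfl)), hnd⟩, ?_⟩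
        intro t ht hmem
        rcases List.mem_cons.mp ht with rfl | ht
        · exact hx' hmem
        · exact hall t ht ((PySem.Set.mem_add s x t).mpr (Or.inl hmem))
      · rintro ⟨hnd, hall⟩
        refine ⟨(List.nodup_cons.mp hnd).2, fun t ht hmem => ?_⟩
        rcases (PySem.Set.mem_add s x t).mp hmem with hmem | hmem
        · exact hall t (by simp [ht]) hmem
        · exact (List.nodup_cons.mp hnd).1 (hmem ▸ ht)

-- B's adjacent scan on a (≤)-sorted list detects exactly non-Nodup
theorem hrt_adj_eq (ts : List String) (hs : ts.Pairwise (· ≤ ·)) :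
    ((List.zip ts (ts.drop 1)).any (fun p => p.1 == p.2)) = !decide ts.Nodup := by
  induction ts with
  | nil => simp
  | cons x rest ih =>
    cases rest with
    | nil => simp
    | cons y rest' =>
      have hx_le_y : x ≤ y := (List.pairwise_cons.mp hs).1 y (by simp)
      have htail : (y :: rest').Pairwise (· ≤ ·) := (List.pairwise_cons.mp hs).2
      have hy_le : ∀ z ∈ rest', y ≤ z := (List.pairwise_cons.mp htail).1
      simp only [List.drop_one, List.tail_cons, List.zip_cons_cons, List.any_cons]
      by_cases hxy : x = y
      · subst hxy
        have hnot : ¬ (x :: x :: rest').Nodup := by simp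
        rw [decide_eq_false hnot]
        simp
      · have hnotin : x ∉ y :: rest' := by
          intro hmem
          rcases List.mem_cons.mp hmem with rfl | hmem
          · exact hxy rfl
          · exact hxy (le_antisymm hx_le_y (hy_le x hmem))
        have hbeq : (x == y) = false := by simp [hxy]
        rw [hbeq, Bool.false_or]
        have := ih htail
        simp only [List.drop_one, List.tail_cons] at this
        rw [this]
        congr 1
        apply decide_eq_decide.mpr
        simp [List.nodup_cons, hnotin]

-- ===== VERDICT (by name: the statement is the Claim_ definition above) =====
theorem has_repeated_tokens_spec : Claim_equal_has_repeated_tokens := by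
  intro term _
  unfold Spec_has_repeated_tokens has_repeated_tokens has_repeated_tokens_alt
  simp only []
  set tokens := PySem.Str.split₀ (PySem.Str.lower term) with htok
  have hne : ∀ t ∈ tokens, t ≠ "" := hrt_split₀_ne_empty _
  set ts := PySem.List.sorted tokens (fun x => x) false with hts
  have hperm : ts.Perm tokens := PySem.List.sorted_perm tokens (fun x => x) false
  have hsorted : ts.Pairwise (· ≤ ·) := PySem.List.sorted_pairwise tokens (fun x => x)
  have hslice : PySem.List.slice ts (some 1) none = ts.drop 1 := by
    simpa using PySem.List.slice_from_natCast ts 1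
  rw [hslice, hrtLoop_eq tokens PySem.Set.empty hne, hrt_adj_eq ts hsorted]
  have : tokens.Nodup ↔ ts.Nodup := (hperm.nodup_iff).symm
  simp [PySem.Set.empty, this]
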